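-- pv_equiv track=rewrite | github.com/SachinthaGunathilaka/Fiverr-All-Projects | Python/Chloejabb/Task 1/part1.py | similarity_to_patients
-- ===== SOURCE A (Python) =====
-- def symptom_similarity(symptomsA, symptomsB):
--     """
--     Compute symptom similiarity between patients A and B.
--
--     Args:
--         symptomsA: a tuple (present, absent) for patient A
--                    where present is a set of symptoms present
--                    and absent is a set of symptoms absent
--         symptomsB: Same format as above but for patient B
--
--     Returns:
--         integer, symptom similiarity between the patients
--     """
--     present_present = len(symptomsA[0] & symptomsB[0])
--     absent_absent = len(symptomsA[1] & symptomsB[1])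
--     present_absent = len(symptomsA[0] & symptomsB[1])
--     absent_present = len(symptomsA[1] & symptomsB[0])
--     return present_present + absent_absent - present_absent - absent_present
--
-- def similarity_to_patients(patient_symptoms, all_patients_symptoms):
--     """Finds patients who have highest similarity of symptoms with a given patient.
--     Args:
--         patient_symptoms: tuple of symptoms present and absent for a given patient.
--         all_patients_symptoms: dictionary of patients IDs (key) and associated tuple of
--                                present and absent symptoms for all patients.
--     Returns:
--         set of patient IDs, who have highest similarity with the given patient.
--     """
--
--     # Initialize max_similarity to 0
--     max_similarity = 0
--
--     # Iterate though each patient in the all_patients_symptoms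
--     for patient_id in all_patients_symptoms.keys():
--         # Calculate similarity between current patient and the given patient
--         similarity = symptom_similarity(patient_symptoms, all_patients_symptoms.get(patient_id))
--
--         # If the similarity is greater than the max_similarity
--         if max_similarity < similarity:
--             # Update the max_similarity
--             max_similarity = similarity
--
--     # Initialize result as an empty set
--     result = set()
--
--     # Iterate though each patient in the all_patients_symptoms
--     for patient_id in all_patients_symptoms.keys():
--         # Calculate similarity between current patient and the given patient
--         similarity = symptom_similarity(patient_symptoms, all_patients_symptoms.get(patient_id))
--
--         # If the similarity is equal to max_similarity
--         if max_similarity == similarity: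
--             # Add current patient to result set
--             result.add(patient_id)
--
--     # Return result
--     return result
-- ===== SOURCE B (Python) =====
-- def symptom_similarity(symptomsA, symptomsB):
--     present_present = len(symptomsA[0] & symptomsB[0])
--     absent_absent = len(symptomsA[1] & symptomsB[1])
--     present_absent = len(symptomsA[0] & symptomsB[1])
--     absent_present = len(symptomsA[1] & symptomsB[0])
--     return present_present + absent_absent - present_absent - absent_present
--
-- def similarity_to_patients(patient_symptoms, all_patients_symptoms):
--     # Single pass: keep the best score seen so far (floored at 0, like A's
--     # initialization) together with the set of ids achieving it; a strictly
--     # better score resets the set, an equal one joins it.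
--     best = 0
--     winners = set()
--     for pid, syms in all_patients_symptoms.items():
--         s = symptom_similarity(patient_symptoms, syms)
--         if s > best:
--             best = s
--             winners = {pid}
--         elif s == best:
--             winners.add(pid)
--     return winners
-- ===== Notes on version B (the rewrite author's own statement) =====
-- stated objective: simpler
-- what changed: B makes a single pass holding a (best score, winner set) accumulator that resets on a strictly better score and extends on a tie, instead of A's two staged key scans (one to find the maximum, one recomputing every similarity to collect the matching ids).
import Mathlib
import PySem

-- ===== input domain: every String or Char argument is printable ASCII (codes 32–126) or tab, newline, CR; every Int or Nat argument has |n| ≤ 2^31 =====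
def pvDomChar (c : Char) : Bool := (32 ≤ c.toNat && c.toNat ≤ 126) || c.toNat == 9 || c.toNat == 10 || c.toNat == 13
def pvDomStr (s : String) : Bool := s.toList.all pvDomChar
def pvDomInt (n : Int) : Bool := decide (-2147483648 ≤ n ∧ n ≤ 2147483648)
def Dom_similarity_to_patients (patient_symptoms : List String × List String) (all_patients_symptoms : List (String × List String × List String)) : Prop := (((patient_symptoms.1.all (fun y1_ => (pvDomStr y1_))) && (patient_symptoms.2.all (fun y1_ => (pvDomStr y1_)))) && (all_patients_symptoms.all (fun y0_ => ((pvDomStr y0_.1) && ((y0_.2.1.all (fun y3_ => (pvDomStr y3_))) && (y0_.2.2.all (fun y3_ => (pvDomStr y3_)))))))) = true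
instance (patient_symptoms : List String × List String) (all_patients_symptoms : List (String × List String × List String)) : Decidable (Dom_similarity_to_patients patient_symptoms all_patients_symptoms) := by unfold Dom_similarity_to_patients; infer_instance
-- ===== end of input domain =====

-- B replaces A's two staged key scans (max pass, then a recomputing collection pass) by a
-- single pass with a (best score, winner set) accumulator (objective: simpler decomposition).

-- shared module helper (both Pythons use the same symptom_similarity)
def symptom_similarity (symptomsA symptomsB : List String × List String) : Int :=
  let present_present := (PySem.Set.inter (PySem.Set.ofList symptomsA.1) symptomsB.1).length
  let absent_absent := (PySem.Set.inter (PySem.Set.ofList symptomsA.2) symptomsB.2).length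
  let present_absent := (PySem.Set.inter (PySem.Set.ofList symptomsA.1) symptomsB.2).length
  let absent_present := (PySem.Set.inter (PySem.Set.ofList symptomsA.2) symptomsB.1).length
  (present_present : Int) + absent_absent - present_absent - absent_present

-- ===== PORT A =====
def similarity_to_patients (patient_symptoms : List String × List String) (all_patients_symptoms : List (String × List String × List String)) : List String :=
  let d := PySem.Dict.ofList all_patients_symptoms
  -- first loop: running maximum, initialized to 0
  let max_similarity := d.keys.foldl (fun max_similarity patient_id =>
    match d.get? patient_id with
    | some syms =>
        let similarity := symptom_similarity patient_symptoms syms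
        if max_similarity < similarity then similarity else max_similarity
    | none => max_similarity) 0  -- none unreachable: patient_id ∈ d.keys
  -- second loop: collect ids whose similarity equals max_similarity
  d.keys.foldl (fun result patient_id =>
    match d.get? patient_id with
    | some syms =>
        if max_similarity == symptom_similarity patient_symptoms syms
        then PySem.Set.add result patient_id else result
    | none => result) PySem.Set.empty  -- none unreachable: patient_id ∈ d.keys

-- ===== PORT B =====
def similarity_to_patients_alt (patient_symptoms : List String × List String) (all_patients_symptoms : List (String × List String × List String)) : List String :=
  let d := PySem.Dict.ofList all_patients_symptoms
  -- single pass: (best, winners); strictly better score resets winners, a tie joins them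
  (d.items.foldl (fun st p =>
      let s := symptom_similarity patient_symptoms p.2
      if st.1 < s then (s, PySem.Set.add PySem.Set.empty p.1)
      else if s == st.1 then (st.1, PySem.Set.add st.2 p.1)
      else st)
    ((0 : Int), PySem.Set.empty)).2

-- ===== PRECONDITION & SPEC =====
def Spec_similarity_to_patients (patient_symptoms : List String × List String) (all_patients_symptoms : List (String × List String × List String)) (out : List String) : Prop := out = similarity_to_patients_alt patient_symptoms all_patients_symptoms
instance (patient_symptoms : List String × List String) (all_patients_symptoms : List (String × List String × List String)) (out : List String) : Decidable (Spec_similarity_to_patients patient_symptoms all_patients_symptoms out) := by unfold Spec_similarity_to_patients; infer_instance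

-- ===== CLAIM (what is proved, stated in full; the proofs are below) =====
def Claim_equal_similarity_to_patients : Prop := ∀ (patient_symptoms : List String × List String) (all_patients_symptoms : List (String × List String × List String)), Dom_similarity_to_patients patient_symptoms all_patients_symptoms → Spec_similarity_to_patients patient_symptoms all_patients_symptoms (similarity_to_patients patient_symptoms all_patients_symptoms)

-- ===== LEMMAS AND PROOFS =====

-- two folds over the same list agree if the step functions agree on its members
lemma foldl_congr_mem'' {α β : Type} (l : List α) (f g : β → α → β) (i : β)
    (h : ∀ b a, a ∈ l → f b a = g b a) : l.foldl f i = l.foldl g i := by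
  induction l generalizing i with
  | nil => rfl
  | cons x t ih =>
      simp only [List.foldl_cons, h i x (by simp)]
      exact ih _ (fun b a ha => h b a (by simp [ha]))

-- the initial value is below a running maximum
lemma le_foldl_max' {α : Type} (l : List α) (σ : α → Int) :
    ∀ b : Int, b ≤ l.foldl (fun m a => max m (σ a)) b := by
  induction l with
  | nil => intro b; exact le_refl b
  | cons x t ih => intro b; exact le_trans (le_max_left _ _) (ih _)

-- characterization of B's single pass: its first component is the running maximum, its
-- second is A's collection fold for that maximum (starting from w only if no score beat b)
lemma single_pass_char {α : Type} (σ : α → Int) (key : α → String) :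
    ∀ (l : List α) (b : Int) (w : List String),
    l.foldl (fun st a =>
        if st.1 < σ a then (σ a, PySem.Set.add PySem.Set.empty (key a))
        else if σ a == st.1 then (st.1, PySem.Set.add st.2 (key a))
        else st) (b, w)
    = (l.foldl (fun m a => max m (σ a)) b,
       l.foldl (fun r a => if (l.foldl (fun m a => max m (σ a)) b) == σ a
                           then PySem.Set.add r (key a) else r)
         (if b = l.foldl (fun m a => max m (σ a)) b then w else PySem.Set.empty)) := by
  intro l
  induction l with
  | nil => intro b w; simp
  | cons x t ih =>
      intro b w
      have hM := le_foldl_max' t σ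
      simp only [List.foldl_cons]
      by_cases h1 : b < σ x
      · have hmax : max b (σ x) = σ x := max_eq_right h1.le
        have hbM : b ≠ t.foldl (fun m a => max m (σ a)) (σ x) := by
          have := hM (σ x); omega
        have hbx : b ≠ σ x := ne_of_lt h1
        simp only [h1, if_true, ih (σ x) (PySem.Set.add PySem.Set.empty (key x)), hmax]
        by_cases h2 : σ x = t.foldl (fun m a => max m (σ a)) (σ x)
        · simp [← h2, hbx]
        · have h3 : (t.foldl (fun m a => max m (σ a)) (σ x) == σ x) = false := by
            have := hM (σ x); simp; omega
          simp [h2, h3, hbM]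
      · have hmax : max b (σ x) = b := max_eq_left (not_lt.mp h1)
        by_cases h2 : σ x = b
        · simp only [h2, lt_irrefl, if_false, beq_self_eq_true, if_true,
            ih b (PySem.Set.add w (key x))]
          by_cases h3 : b = t.foldl (fun m a => max m (σ a)) b
          · simp [← h3]
          · have h4 : (t.foldl (fun m a => max m (σ a)) b == b) = false := by
              have := hM b; simp; omega
            simp [h3, h4]
        · have h2' : ¬ ((σ x == b) = true) := by simp [h2]
          rw [if_neg h1, if_neg h2', ih b w]
          simp only [hmax]
          have h6 : (t.foldl (fun m a => max m (σ a)) b == σ x) = false := by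
            have := hM b
            have h5 : σ x < b := lt_of_le_of_ne (not_lt.mp h1) h2
            simp; omega
          simp [h6]

-- A's running-maximum step is the max combinator
lemma running_max_proj' {α : Type} (l : List α) (f : α → Int) (i : Int) :
    l.foldl (fun m a => if m < f a then f a else m) i
      = l.foldl (fun m a => max m (f a)) i := by
  apply foldl_congr_mem''
  intro b a _
  rcases lt_or_ge b (f a) with h | h
  · simp [h, max_eq_right h.le]
  · simp [not_lt.mpr h, max_eq_left h]

-- ===== VERDICT (by name: the statement is the Claim_ definition above) =====
theorem similarity_to_patients_spec : Claim_equal_similarity_to_patients := by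
  intro ps aps _
  unfold Spec_similarity_to_patients
  simp only [similarity_to_patients, similarity_to_patients_alt]
  set d := PySem.Dict.ofList aps with hd
  have hnd : d.keys.Nodup := PySem.Dict.nodup_keys_ofList aps
  set σ : (String × List String × List String) → Int :=
    (fun a => symptom_similarity ps a.2) with hσ
  have hget : ∀ a ∈ d.items, d.get? a.1 = some a.2 := by
    rintro ⟨k, v⟩ ha
    exact PySem.Dict.get?_of_mem_items d ha hnd
  have hkeys : d.keys = d.items.map (·.1) := rfl
  -- A's first loop computes the running maximum of the scores over the items
  have hmax : (d.keys.foldl (fun m patient_id =>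
      match d.get? patient_id with
      | some syms => if m < symptom_similarity ps syms then symptom_similarity ps syms else m
      | none => m) 0)
      = d.items.foldl (fun m a => max m (σ a)) 0 := by
    rw [hkeys, List.foldl_map]
    rw [foldl_congr_mem'' _ _ (fun m a => if m < σ a then σ a else m) 0
      (by intro b a ha; simp only [hget a ha]; rfl)]
    exact running_max_proj' _ _ _
  rw [hmax]
  -- A's second loop is the selection fold over the items
  rw [hkeys, List.foldl_map]
  rw [foldl_congr_mem'' _ _
    (fun r a => if d.items.foldl (fun m a => max m (σ a)) 0 == σ a
                then PySem.Set.add r a.1 else r) PySem.Set.empty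
    (by intro b a ha; simp only [hget a ha]; rfl)]
  -- B's single pass is the same selection fold (its start is empty either way)
  rw [single_pass_char σ (·.1) d.items 0 PySem.Set.empty]
  simp
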